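-- pv_equiv track=rewrite | github.com/beebopkim/spartan_algorithm | week_1/homework/02_find_count_to_turn_out_to_all_zero_or_all_one.py | find_count_to_turn_out_to_all_zero_or_all_one
-- ===== SOURCE A (Python) =====
-- def find_count_to_turn_out_to_all_zero_or_all_one(string):
--     first_char = string[0]
--     prev_char = first_char
--
--     cnt = 0
--     for x in string[1:]:
--         if x != first_char and x != prev_char:
--             cnt += 1
--         prev_char = x
--
--     return cnt
-- ===== SOURCE B (Python) =====
-- def find_count_to_turn_out_to_all_zero_or_all_one(string):
--     first_char = string[0]
--     # collapse the string into its sequence of run characters (one per maximal run)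
--     run_chars = []
--     for c in string:
--         if run_chars and run_chars[-1] == c:
--             continue
--         run_chars.append(c)
--     # answer = number of runs whose character differs from the first character
--     return sum(1 for c in run_chars if c != first_char)
-- ===== Notes on version B (the rewrite author's own statement) =====
-- stated objective: alternative
-- what changed: B collapses the string into its list of maximal-run characters and counts the runs whose character differs from the first character, instead of A's single pass detecting transitions with a prev_char state variable.
-- outside the precondition, e.g. on find_count_to_turn_out_to_all_zero_or_all_one(''): A raises IndexError, B raises IndexError
import Mathlib
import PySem

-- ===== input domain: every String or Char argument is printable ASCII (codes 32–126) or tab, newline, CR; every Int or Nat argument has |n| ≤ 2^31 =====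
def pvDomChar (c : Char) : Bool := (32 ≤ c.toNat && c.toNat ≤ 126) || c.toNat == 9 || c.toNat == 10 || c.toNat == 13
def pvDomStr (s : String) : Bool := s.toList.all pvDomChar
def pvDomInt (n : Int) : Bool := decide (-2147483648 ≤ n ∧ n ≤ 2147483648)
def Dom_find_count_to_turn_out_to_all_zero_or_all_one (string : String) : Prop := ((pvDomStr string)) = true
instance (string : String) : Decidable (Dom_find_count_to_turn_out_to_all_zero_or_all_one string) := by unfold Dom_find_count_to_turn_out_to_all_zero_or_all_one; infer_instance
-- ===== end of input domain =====

-- B counts maximal runs whose character differs from the first character, instead of A's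
-- prev_char transition detection; same cost ("alternative"). Both raise on the empty string.

-- ===== PORT A =====
-- state = (prev_char, cnt); loop over string[1:]
def find_count_to_turn_out_to_all_zero_or_all_one (string : String) : Int :=
  match string.toList with
  | [] => 0  -- string[0] raises IndexError in Python; excluded by Pre_
  | first_char :: rest =>
    (rest.foldl
      (fun (st : Char × Int) x =>
        (x, if x ≠ first_char ∧ x ≠ st.1 then st.2 + 1 else st.2))
      (first_char, 0)).2

-- ===== PORT B =====
def find_count_to_turn_out_to_all_zero_or_all_one_alt (string : String) : Int :=
  match string.toList with
  | [] => 0  -- string[0] raises IndexError in Python; excluded by Pre_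
  | first_char :: _ =>
    let run_chars := string.toList.foldl
      (fun (acc : List Char) c =>
        if acc ≠ [] ∧ acc.getLast? = some c then acc else acc ++ [c]) []
    ((run_chars.countP (fun c => c ≠ first_char) : Nat) : Int)

-- ===== PRECONDITION & SPEC =====
-- Pre_ excludes only the empty string, on which the Python A raises IndexError (string[0]).
def Pre_find_count_to_turn_out_to_all_zero_or_all_one (string : String) : Prop := string ≠ ""
instance (string : String) : Decidable (Pre_find_count_to_turn_out_to_all_zero_or_all_one string) := by unfold Pre_find_count_to_turn_out_to_all_zero_or_all_one; infer_instance
def pvWitness_find_count_to_turn_out_to_all_zero_or_all_one : String := "0010"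

def Spec_find_count_to_turn_out_to_all_zero_or_all_one (string : String) (out : Int) : Prop := out = find_count_to_turn_out_to_all_zero_or_all_one_alt string
instance (string : String) (out : Int) : Decidable (Spec_find_count_to_turn_out_to_all_zero_or_all_one string out) := by unfold Spec_find_count_to_turn_out_to_all_zero_or_all_one; infer_instance

-- ===== CLAIM (what is proved, stated in full; the proofs are below) =====
def Claim_equal_find_count_to_turn_out_to_all_zero_or_all_one : Prop := ∀ (string : String), Dom_find_count_to_turn_out_to_all_zero_or_all_one string → Pre_find_count_to_turn_out_to_all_zero_or_all_one string → Spec_find_count_to_turn_out_to_all_zero_or_all_one string (find_count_to_turn_out_to_all_zero_or_all_one string)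

-- ===== LEMMAS AND PROOFS =====

-- run characters of l, given that the character just before l was p
def pvDedupe : Char → List Char → List Char
  | _, [] => []
  | p, x :: xs => if x = p then pvDedupe p xs else x :: pvDedupe x xs

lemma pvLoopA_eq (f : Char) : ∀ (l : List Char) (p : Char) (cnt : Int),
    (l.foldl (fun (st : Char × Int) x =>
        (x, if x ≠ f ∧ x ≠ st.1 then st.2 + 1 else st.2)) (p, cnt)).2
      = cnt + (((pvDedupe p l).countP (fun c => c ≠ f) : Nat) : Int) := by
  intro l
  induction l with
  | nil => intro p cnt; simp [pvDedupe]
  | cons x xs ih =>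
    intro p cnt
    by_cases hxp : x = p
    · subst hxp
      simp [pvDedupe, List.foldl, ih]
    · simp only [List.foldl, pvDedupe, if_neg hxp]
      by_cases hxf : x = f
      · simp [hxf, ih]
      · have : x ≠ f ∧ x ≠ p := ⟨hxf, hxp⟩
        simp [ih, hxf, hxp]
        omega

lemma pvLoopB_eq : ∀ (l : List Char) (acc : List Char) (p : Char),
    acc.getLast? = some p →
    l.foldl (fun (acc : List Char) c =>
        if acc ≠ [] ∧ acc.getLast? = some c then acc else acc ++ [c]) acc
      = acc ++ pvDedupe p l := by
  intro l
  induction l with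
  | nil => intro acc p _; simp [pvDedupe]
  | cons x xs ih =>
    intro acc p hlast
    have hne : acc ≠ [] := by
      intro h; subst h; simp at hlast
    by_cases hxp : x = p
    · subst hxp
      have e1 : (if acc ≠ [] ∧ acc.getLast? = some x then acc else acc ++ [x]) = acc :=
        if_pos ⟨hne, hlast⟩
      simp only [List.foldl, e1, pvDedupe, if_true]
      exact ih acc x hlast
    · have hcond : ¬ (acc ≠ [] ∧ acc.getLast? = some x) := by
        rintro ⟨-, h⟩
        rw [hlast] at h
        exact hxp (Option.some.injEq _ _ ▸ h).symm
      simp only [List.foldl, if_neg hcond, pvDedupe, if_neg hxp]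
      have := ih (acc ++ [x]) x (by simp)
      rw [this, List.append_assoc]
      rfl

-- ===== VERDICT (by name: the statement is the Claim_ definition above) =====
theorem find_count_to_turn_out_to_all_zero_or_all_one_spec : Claim_equal_find_count_to_turn_out_to_all_zero_or_all_one := by
  intro s _ _
  unfold Spec_find_count_to_turn_out_to_all_zero_or_all_one
  unfold find_count_to_turn_out_to_all_zero_or_all_one find_count_to_turn_out_to_all_zero_or_all_one_alt
  cases h : s.toList with
  | nil => rfl
  | cons c cs =>
    dsimp only
    rw [pvLoopA_eq]
    have hb : (c :: cs).foldl (fun (acc : List Char) x =>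
        if acc ≠ [] ∧ acc.getLast? = some x then acc else acc ++ [x]) []
        = [c] ++ pvDedupe c cs := by
      simp only [List.foldl]
      rw [if_neg (by simp)]
      exact pvLoopB_eq cs [c] c (by simp)
    simp [hb]
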